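-- pv_equiv track=rewrite | github.com/AhmedBegggaUA/result_page | Pagina.py | plot_pareto_curve_plotly
-- ===== SOURCE A (Python) =====
-- def compute_pareto_set(objective1_list, objective2_list):
--     """
--     Return objective values for the subset of solutions that
--     lie on the pareto front.
--     """
--
--     assert len(objective1_list) == len(objective2_list), \
--         "Each solution must have a value for each objective."
--
--     n_solutions = len(objective1_list)
--
--     objective1_pareto = []
--     objective2_pareto = []
--     for i in range(n_solutions):
--         is_in_pareto_set = True
--         for j in range(n_solutions):
--             if (objective1_list[j] < objective1_list[i]) and \
--                     (objective2_list[j] < objective2_list[i]):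
--                 is_in_pareto_set = False
--         if is_in_pareto_set:
--             objective1_pareto.append(objective1_list[i])
--             objective2_pareto.append(objective2_list[i])
--
--     return objective1_pareto, objective2_pareto
--
-- def plot_pareto_curve_plotly(objective1_list, objective2_list):
--     """
--     Plot the pareto curve given the objective values for a set of solutions.
--     This curve indicates the area dominated by the solution set, i.e.,
--     every point up and to the right is dominated.
--     """
--
--     objective1_pareto, objective2_pareto = compute_pareto_set(objective1_list,
--                                                               objective2_list)
--
--     objective1_pareto, objective2_pareto = list(zip(*sorted(zip(objective1_pareto,
--                                                                 objective2_pareto))))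
--
--     xs = []
--     ys = []
--
--     xs.append(objective1_pareto[0])
--     ys.append(objective2_pareto[0])
--
--     for i in range(0, len(objective1_pareto)-1):
--
--         # Add intermediate point between successive solutions
--         xs.append(objective1_pareto[i+1])
--         ys.append(objective2_pareto[i])
--
--         # Add next solution on front
--         xs.append(objective1_pareto[i+1])
--         ys.append(objective2_pareto[i+1])
--
--     return xs, ys
-- ===== SOURCE B (Python) =====
-- def plot_pareto_curve_plotly(objective1_list, objective2_list):
--     assert len(objective1_list) == len(objective2_list), \
--         "Each solution must have a value for each objective."
--
--     pts = sorted(zip(objective1_list, objective2_list))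
--
--     xs = []
--     ys = []
--     cur_x = None   # objective1 value of the group being scanned
--     min_y = None   # min objective2 among points with objective1 strictly below cur_x
--     best = None    # min objective2 among all points scanned so far
--     prev_y = None  # objective2 of the last point added to the front
--     for x, y in pts:
--         if cur_x is None or x != cur_x:
--             cur_x = x
--             min_y = best
--         if min_y is None or y <= min_y:
--             # non-dominated: extend the staircase
--             if xs:
--                 xs.append(x)
--                 ys.append(prev_y)
--             xs.append(x)
--             ys.append(y)
--             prev_y = y
--         if best is None or y < best:
--             best = y
--     return xs, ys
-- ===== Notes on version B (the rewrite author's own statement) =====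
-- stated objective: faster
-- what changed: Replaced the all-pairs domination test plus separate sort/staircase passes by one lexicographic sort followed by a single sweep that tracks the minimum objective2 among strictly-smaller objective1 points and emits the staircase on the fly.
import Mathlib
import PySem

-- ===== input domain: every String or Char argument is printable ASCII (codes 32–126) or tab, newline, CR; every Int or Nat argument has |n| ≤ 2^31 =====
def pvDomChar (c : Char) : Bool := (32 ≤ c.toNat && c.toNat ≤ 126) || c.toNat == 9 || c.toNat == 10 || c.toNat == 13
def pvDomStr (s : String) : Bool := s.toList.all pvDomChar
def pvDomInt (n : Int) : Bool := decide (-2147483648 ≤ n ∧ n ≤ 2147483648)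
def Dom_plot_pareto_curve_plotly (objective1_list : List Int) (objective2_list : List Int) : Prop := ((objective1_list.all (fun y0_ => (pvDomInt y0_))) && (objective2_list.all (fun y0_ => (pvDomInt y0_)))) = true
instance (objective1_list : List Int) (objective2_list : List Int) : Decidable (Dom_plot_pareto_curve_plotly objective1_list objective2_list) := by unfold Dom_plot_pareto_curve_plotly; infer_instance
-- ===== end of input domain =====

-- B replaces A's all-pairs domination test plus separate sort/staircase passes by one
-- lexicographic sort and a single sweep (objective: faster, O(n^2) → O(n log n)).

-- ===== PORT A =====
def compute_pareto_set (objective1_list : List Int) (objective2_list : List Int) : List Int × List Int :=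
  let n_solutions : Int := (objective1_list.length : Int)
  (PySem.List.pyRange 0 n_solutions 1).foldl (fun acc i =>
    let is_in_pareto_set :=
      (PySem.List.pyRange 0 n_solutions 1).foldl (fun flag j =>
        if PySem.List.pyGetD objective1_list j 0 < PySem.List.pyGetD objective1_list i 0 ∧
           PySem.List.pyGetD objective2_list j 0 < PySem.List.pyGetD objective2_list i 0 then
          false
        else flag) true
    if is_in_pareto_set then
      (acc.1 ++ [PySem.List.pyGetD objective1_list i 0], acc.2 ++ [PySem.List.pyGetD objective2_list i 0])
    else acc) ([], [])

def plot_pareto_curve_plotly (objective1_list : List Int) (objective2_list : List Int) : List Int × List Int :=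
  let pareto := compute_pareto_set objective1_list objective2_list
  let pts := PySem.List.sorted2 (pareto.1.zip pareto.2) Prod.fst Prod.snd
  let objective1_pareto := pts.map Prod.fst
  let objective2_pareto := pts.map Prod.snd
  let xs := [PySem.List.pyGetD objective1_pareto 0 0]
  let ys := [PySem.List.pyGetD objective2_pareto 0 0]
  (PySem.List.pyRange 0 ((objective1_pareto.length : Int) - 1) 1).foldl (fun acc i =>
    (acc.1 ++ [PySem.List.pyGetD objective1_pareto (i + 1) 0] ++ [PySem.List.pyGetD objective1_pareto (i + 1) 0],
     acc.2 ++ [PySem.List.pyGetD objective2_pareto i 0] ++ [PySem.List.pyGetD objective2_pareto (i + 1) 0]))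
    (xs, ys)

-- ===== PORT B =====
structure PvBState where
  xs : List Int
  ys : List Int
  curX : Option Int
  minY : Option Int
  best : Option Int
  prevY : Option Int
deriving Repr, DecidableEq

def pvBStep (s : PvBState) (p : Int × Int) : PvBState :=
  let x := p.1
  let y := p.2
  let s1 := if s.curX ≠ some x then { s with curX := some x, minY := s.best } else s
  let survives := match s1.minY with | none => true | some m => decide (y ≤ m)
  let s2 :=
    if survives then
      let base := if s1.xs ≠ [] then (s1.xs ++ [x], s1.ys ++ [s1.prevY.getD 0]) else (s1.xs, s1.ys)
      { s1 with xs := base.1 ++ [x], ys := base.2 ++ [y], prevY := some y }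
    else s1
  { s2 with best := match s2.best with | none => some y | some b => if y < b then some y else some b }

def plot_pareto_curve_plotly_alt (objective1_list : List Int) (objective2_list : List Int) : List Int × List Int :=
  let pts := PySem.List.sorted2 (objective1_list.zip objective2_list) Prod.fst Prod.snd
  let f := pts.foldl pvBStep ⟨[], [], none, none, none, none⟩
  (f.xs, f.ys)

-- ===== PRECONDITION & SPEC =====
-- A asserts equal lengths (AssertionError otherwise) and unpacks/indexes the first pareto
-- point (ValueError on empty input): Pre_ excludes exactly those raising inputs.
def Pre_plot_pareto_curve_plotly (objective1_list : List Int) (objective2_list : List Int) : Prop :=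
  objective1_list.length = objective2_list.length ∧ objective1_list ≠ []
instance (objective1_list : List Int) (objective2_list : List Int) : Decidable (Pre_plot_pareto_curve_plotly objective1_list objective2_list) := by unfold Pre_plot_pareto_curve_plotly; infer_instance
def pvWitness_plot_pareto_curve_plotly : List Int × List Int := ([0, 2], [1, 0])

def Spec_plot_pareto_curve_plotly (objective1_list : List Int) (objective2_list : List Int) (out : List Int × List Int) : Prop := out = plot_pareto_curve_plotly_alt objective1_list objective2_list
instance (objective1_list : List Int) (objective2_list : List Int) (out : List Int × List Int) : Decidable (Spec_plot_pareto_curve_plotly objective1_list objective2_list out) := by unfold Spec_plot_pareto_curve_plotly; infer_instance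

-- ===== CLAIM (what is proved, stated in full; the proofs are below) =====
def Claim_equal_plot_pareto_curve_plotly : Prop := ∀ (objective1_list : List Int) (objective2_list : List Int), Dom_plot_pareto_curve_plotly objective1_list objective2_list → Pre_plot_pareto_curve_plotly objective1_list objective2_list → Spec_plot_pareto_curve_plotly objective1_list objective2_list (plot_pareto_curve_plotly objective1_list objective2_list)

-- ===== LEMMAS AND PROOFS =====

-- The lexicographic order Python's tuple sort uses, and the domination test.
def pvLexLe (a b : Int × Int) : Prop := a.1 < b.1 ∨ (a.1 = b.1 ∧ a.2 ≤ b.2)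

def pvNoDominator (l : List (Int × Int)) (p : Int × Int) : Bool :=
  l.all (fun q => !(decide (q.1 < p.1) && decide (q.2 < p.2)))

def pvBefore (a b : Int × Int) : Bool :=
  decide (a.1 < b.1) || (!decide (b.1 < a.1) && decide (a.2 < b.2))

-- the staircase built from the sorted pareto points
def pvStairXs (q : List (Int × Int)) : List Int :=
  match q with
  | [] => []
  | h :: t => h.1 :: t.flatMap (fun b => [b.1, b.1])

def pvStairYs (q : List (Int × Int)) : List Int :=
  match q with
  | [] => []
  | h :: t => h.2 :: ((h :: t).zip t).flatMap (fun ab => [ab.1.2, ab.2.2])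

def pvBelow (t : List (Int × Int)) (x : Int) : List Int :=
  (t.filter (fun q => decide (q.1 < x))).map Prod.snd

def pvSpecState (s t : List (Int × Int)) : PvBState :=
  { xs := pvStairXs (t.filter (pvNoDominator s)),
    ys := pvStairYs (t.filter (pvNoDominator s)),
    curX := t.getLast?.map Prod.fst,
    minY := match t.getLast? with | none => none | some q => (pvBelow t q.1).min?,
    best := (t.map Prod.snd).min?,
    prevY := (t.filter (pvNoDominator s)).getLast?.map Prod.snd }

-- ---- A characterization ----

lemma pv_inner_flag (p : Int × Int) (l : List (Int × Int)) (init : Bool) :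
    l.foldl (fun flag q => if q.1 < p.1 ∧ q.2 < p.2 then false else flag) init
      = (init && pvNoDominator l p) := by
  induction l generalizing init with
  | nil => simp [pvNoDominator]
  | cons q t ih =>
    simp only [List.foldl_cons, pvNoDominator, List.all_cons]
    rw [ih]
    by_cases h : q.1 < p.1 ∧ q.2 < p.2
    · simp [h, pvNoDominator]
    · simp [h, pvNoDominator]
      rw [Decidable.not_and_iff_or_not] at h
      rcases h with h | h <;> simp [h]

lemma pv_outer_filter (P : Int × Int → Bool) (l : List (Int × Int)) (a b : List Int) :
    l.foldl (fun acc p => if P p then (acc.1 ++ [p.1], acc.2 ++ [p.2]) else acc) (a, b)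
      = (a ++ (l.filter P).map Prod.fst, b ++ (l.filter P).map Prod.snd) := by
  induction l generalizing a b with
  | nil => simp
  | cons q t ih =>
    simp only [List.foldl_cons, List.filter_cons]
    by_cases h : P q
    · simp [h, ih]
    · simp [h, ih]

lemma pv_getD_zip_fst (o1 o2 : List Int) (h : o1.length = o2.length) (i : Int)
    (h0 : 0 ≤ i) (h1 : i < (o1.length : Int)) :
    PySem.List.pyGetD o1 i 0 = (PySem.List.pyGetD (o1.zip o2) i (0, 0)).1 := by
  have hz : (o1.zip o2).length = o1.length := by rw [List.length_zip, ← h, min_self]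
  rw [PySem.List.pyGetD_eq_getElem o1 0 h0 h1,
      PySem.List.pyGetD_eq_getElem (o1.zip o2) (0, 0) h0 (by omega)]
  rw [List.getElem_zip]

lemma pv_getD_zip_snd (o1 o2 : List Int) (h : o1.length = o2.length) (i : Int)
    (h0 : 0 ≤ i) (h1 : i < (o1.length : Int)) :
    PySem.List.pyGetD o2 i 0 = (PySem.List.pyGetD (o1.zip o2) i (0, 0)).2 := by
  have hz : (o1.zip o2).length = o1.length := by rw [List.length_zip, ← h, min_self]
  rw [PySem.List.pyGetD_eq_getElem o2 0 h0 (by omega),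
      PySem.List.pyGetD_eq_getElem (o1.zip o2) (0, 0) h0 (by omega)]
  rw [List.getElem_zip]

lemma pv_compute_pareto_eq (o1 o2 : List Int) (h : o1.length = o2.length) :
    compute_pareto_set o1 o2
      = (((o1.zip o2).filter (pvNoDominator (o1.zip o2))).map Prod.fst,
         ((o1.zip o2).filter (pvNoDominator (o1.zip o2))).map Prod.snd) := by
  have hz : (o1.zip o2).length = o1.length := by rw [List.length_zip, ← h, min_self]
  unfold compute_pareto_set
  rw [show (o1.length : Int) = ((o1.zip o2).length : Int) from by rw [hz]]
  rw [PySem.List.foldl_congr_mem _ _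
    (fun acc j => (fun (acc : List Int × List Int) (p : Int × Int) =>
      if pvNoDominator (o1.zip o2) p then (acc.1 ++ [p.1], acc.2 ++ [p.2]) else acc)
      acc (PySem.List.pyGetD (o1.zip o2) j (0, 0))) _ ?_]
  · rw [PySem.List.foldl_pyRange_zero_pyGetD' (o1.zip o2) (0, 0)
        (fun acc p => if pvNoDominator (o1.zip o2) p then (acc.1 ++ [p.1], acc.2 ++ [p.2]) else acc) ([], [])]
    exact pv_outer_filter _ _ [] []
  · intro acc i hi
    rw [PySem.List.mem_pyRange_one] at hi
    obtain ⟨h0, h1⟩ := hi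
    rw [pv_getD_zip_fst o1 o2 h i h0 (by omega), pv_getD_zip_snd o1 o2 h i h0 (by omega)]
    simp only []
    rw [PySem.List.foldl_congr_mem _ _
      (fun flag j => (fun (flag : Bool) (q : Int × Int) =>
        if q.1 < (PySem.List.pyGetD (o1.zip o2) i (0, 0)).1 ∧ q.2 < (PySem.List.pyGetD (o1.zip o2) i (0, 0)).2
        then false else flag) flag (PySem.List.pyGetD (o1.zip o2) j (0, 0))) _ ?_]
    · rw [PySem.List.foldl_pyRange_zero_pyGetD' (o1.zip o2) (0, 0)
          (fun (flag : Bool) (q : Int × Int) =>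
            if q.1 < (PySem.List.pyGetD (o1.zip o2) i (0, 0)).1 ∧ q.2 < (PySem.List.pyGetD (o1.zip o2) i (0, 0)).2
            then false else flag) true, pv_inner_flag, Bool.true_and]
    · intro flag j hj
      rw [PySem.List.mem_pyRange_one] at hj
      obtain ⟨g0, g1⟩ := hj
      rw [pv_getD_zip_fst o1 o2 h j g0 (by omega), pv_getD_zip_snd o1 o2 h j g0 (by omega)]

lemma pvNoDominator_perm {l l' : List (Int × Int)} (p : Int × Int) (h : l.Perm l') :
    pvNoDominator l p = pvNoDominator l' p := by
  unfold pvNoDominator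
  apply Bool.eq_iff_iff.mpr
  simp only [List.all_eq_true]
  constructor
  · intro hc x hx; exact hc x (h.mem_iff.mpr hx)
  · intro hc x hx; exact hc x (h.mem_iff.mp hx)

-- ---- sorted2 facts ----

lemma pvBefore_true {a b : Int × Int} (h : pvBefore a b = true) : pvLexLe a b := by
  unfold pvBefore at h; unfold pvLexLe
  simp only [Bool.or_eq_true, Bool.and_eq_true, Bool.not_eq_true', decide_eq_true_eq, decide_eq_false_iff_not] at h
  rcases h with h | ⟨h1, h2⟩
  · exact Or.inl h
  · rcases lt_trichotomy a.1 b.1 with h' | h' | h'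
    · exact Or.inl h'
    · exact Or.inr ⟨h', le_of_lt h2⟩
    · exact absurd h' h1

lemma pvBefore_false {a b : Int × Int} (h : pvBefore a b = false) : pvLexLe b a := by
  unfold pvBefore at h; unfold pvLexLe
  simp only [Bool.or_eq_false_iff, Bool.and_eq_false_iff, Bool.not_eq_false', decide_eq_true_eq, decide_eq_false_iff_not] at h
  obtain ⟨h1, h2⟩ := h
  rcases h2 with h2 | h2
  · exact Or.inl h2
  · rcases lt_trichotomy b.1 a.1 with h' | h' | h'
    · exact Or.inl h'
    · exact Or.inr ⟨h', by omega⟩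
    · exact absurd h' h1

lemma pvLexLe_trans {a b c : Int × Int} (h1 : pvLexLe a b) (h2 : pvLexLe b c) : pvLexLe a c := by
  unfold pvLexLe at *; omega

lemma pv_insertBy_pairwise (x : Int × Int) (ys : List (Int × Int))
    (h : ys.Pairwise pvLexLe) : (PySem.List.insertBy pvBefore x ys).Pairwise pvLexLe := by
  induction ys with
  | nil => simp [PySem.List.insertBy]
  | cons y t ih =>
    rw [List.pairwise_cons] at h
    obtain ⟨hy, ht⟩ := h
    by_cases hb : pvBefore x y = true
    · rw [show PySem.List.insertBy pvBefore x (y :: t) = x :: y :: t from by simp [PySem.List.insertBy, hb]]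
      refine List.Pairwise.cons ?_ (List.Pairwise.cons hy ht)
      intro z hz
      rcases List.mem_cons.mp hz with rfl | hz
      · exact pvBefore_true hb
      · exact pvLexLe_trans (pvBefore_true hb) (hy z hz)
    · rw [show PySem.List.insertBy pvBefore x (y :: t) = y :: PySem.List.insertBy pvBefore x t from by
        simp [PySem.List.insertBy, hb]]
      refine List.Pairwise.cons ?_ (ih ht)
      intro z hz
      rcases (PySem.List.mem_insertBy pvBefore x z t).mp hz with rfl | hz
      · exact pvBefore_false (by simpa using hb)
      · exact hy z hz

lemma pv_sorted2_pairwise (xs : List (Int × Int)) :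
    (PySem.List.sorted2 xs Prod.fst Prod.snd).Pairwise pvLexLe := by
  have main : ∀ (l acc : List (Int × Int)), acc.Pairwise pvLexLe →
      (l.foldl (fun acc x => PySem.List.insertBy pvBefore x acc) acc).Pairwise pvLexLe := by
    intro l
    induction l with
    | nil => intro acc h; simpa using h
    | cons a t ih =>
      intro acc h
      simp only [List.foldl_cons]
      exact ih _ (pv_insertBy_pairwise a acc h)
  have : PySem.List.sorted2 xs Prod.fst Prod.snd
      = xs.foldl (fun acc x => PySem.List.insertBy pvBefore x acc) [] := by
    unfold PySem.List.sorted2 pvBefore; rfl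
  rw [this]
  exact main xs [] (by simp)

lemma pv_toLex_le {a b : Int × Int} : pvLexLe a b ↔ (toLex a ≤ toLex b) := by
  rw [Prod.Lex.le_iff]; rfl

lemma pv_filter_sorted_comm (P : (Int × Int) → Bool) (l : List (Int × Int)) :
    PySem.List.sorted2 (l.filter P) Prod.fst Prod.snd
      = (PySem.List.sorted2 l Prod.fst Prod.snd).filter P := by
  apply PySem.List.eq_of_perm_of_pairwise_le_of_injective (fun p => toLex p) (toLex.injective)
  · exact (PySem.List.sorted2_perm _ _ _ _).trans ((PySem.List.sorted2_perm l Prod.fst Prod.snd false).filter P).symm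
  · exact (pv_sorted2_pairwise _).imp (fun h => pv_toLex_le.mp h)
  · exact (List.Pairwise.sublist (List.filter_sublist) (pv_sorted2_pairwise l)).imp (fun h => pv_toLex_le.mp h)

-- ---- staircase facts ----

lemma pvStairXs_ne_nil_iff (q : List (Int × Int)) : pvStairXs q = [] ↔ q = [] := by
  cases q <;> simp [pvStairXs]

lemma pvStairXs_snoc (q : List (Int × Int)) (p : Int × Int) (h : q ≠ []) :
    pvStairXs (q ++ [p]) = pvStairXs q ++ [p.1, p.1] := by
  cases q with
  | nil => exact absurd rfl h
  | cons a t => simp [pvStairXs]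

lemma pv_zip_tail_snoc (q : List (Int × Int)) (p : Int × Int) (h : q ≠ []) :
    (q ++ [p]).zip (q.tail ++ [p]) = q.zip q.tail ++ [(q.getLast h, p)] := by
  induction q with
  | nil => exact absurd rfl h
  | cons a t ih =>
    cases t with
    | nil => simp
    | cons b u =>
      have key := ih (by simp)
      simp only [List.tail_cons] at key
      simp only [List.cons_append, List.tail_cons, List.zip_cons_cons]
      rw [show (b :: (u ++ [p])) = (b :: u) ++ [p] from by simp, key]
      simp [List.getLast]

lemma pvStairYs_snoc (q : List (Int × Int)) (p : Int × Int) (h : q ≠ []) :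
    pvStairYs (q ++ [p]) = pvStairYs q ++ [(q.getLast h).2, p.2] := by
  cases q with
  | nil => exact absurd rfl h
  | cons a t =>
    have key := pv_zip_tail_snoc (a :: t) p (by simp)
    simp only [List.tail_cons] at key
    show pvStairYs ((a :: t) ++ [p]) = _
    simp only [List.cons_append, pvStairYs]
    rw [show (a :: (t ++ [p])) = (a :: t) ++ [p] from by simp, key]
    simp

lemma pv_getD_append_left {α : Type} (xs ys : List α) (i : Int) (d : α)
    (h0 : 0 ≤ i) (h1 : i < (xs.length : Int)) :
    PySem.List.pyGetD (xs ++ ys) i d = PySem.List.pyGetD xs i d := by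
  rw [PySem.List.pyGetD_eq_getElem (xs ++ ys) d h0 (by simp; omega),
      PySem.List.pyGetD_eq_getElem xs d h0 h1]
  rw [List.getElem_append_left]

lemma pv_getD_append_last {α : Type} (xs : List α) (x : α) (d : α) :
    PySem.List.pyGetD (xs ++ [x]) (xs.length : Int) d = x := by
  rw [PySem.List.pyGetD_eq_getElem (xs ++ [x]) d (by omega) (by simp)]
  simp

lemma pv_A_stair (q : List (Int × Int)) (hq : q ≠ []) :
    (PySem.List.pyRange 0 (((q.map Prod.fst).length : Int) - 1) 1).foldl
      (fun acc i =>
        (acc.1 ++ [PySem.List.pyGetD (q.map Prod.fst) (i + 1) 0] ++ [PySem.List.pyGetD (q.map Prod.fst) (i + 1) 0],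
         acc.2 ++ [PySem.List.pyGetD (q.map Prod.snd) i 0] ++ [PySem.List.pyGetD (q.map Prod.snd) (i + 1) 0]))
      ([PySem.List.pyGetD (q.map Prod.fst) 0 0], [PySem.List.pyGetD (q.map Prod.snd) 0 0])
    = (pvStairXs q, pvStairYs q) := by
  induction q using List.reverseRecOn with
  | nil => exact absurd rfl hq
  | append_singleton q p ih =>
    cases hq' : q with
    | nil =>
      subst hq'
      simp only [List.nil_append, List.map_cons, List.map_nil, List.length_cons, List.length_nil]
      rw [show ((1 : Nat) : Int) - 1 = 0 from by omega, PySem.List.pyRange_one_eq_nil (by omega)]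
      simp [pvStairXs, pvStairYs, PySem.List.pyGetD_zero_cons]
    | cons a t =>
      rw [← hq']
      have hqne : q ≠ [] := by rw [hq']; simp
      have hlen : (1 : Int) ≤ (q.length : Int) := by
        have : 0 < q.length := List.length_pos_iff.mpr hqne
        omega
      have e1 : (((q ++ [p]).map Prod.fst).length : Int) - 1 = ((q.length : Int) - 1) + 1 := by
        simp only [List.length_map, List.length_append, List.length_cons, List.length_nil]
        push_cast
        ring
      have hpre : (PySem.List.pyRange 0 ((q.length : Int) - 1) 1).foldl
          (fun acc i =>
            (acc.1 ++ [PySem.List.pyGetD ((q ++ [p]).map Prod.fst) (i + 1) 0] ++ [PySem.List.pyGetD ((q ++ [p]).map Prod.fst) (i + 1) 0],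
             acc.2 ++ [PySem.List.pyGetD ((q ++ [p]).map Prod.snd) i 0] ++ [PySem.List.pyGetD ((q ++ [p]).map Prod.snd) (i + 1) 0]))
          ([PySem.List.pyGetD (q.map Prod.fst) 0 0], [PySem.List.pyGetD (q.map Prod.snd) 0 0])
          = (pvStairXs q, pvStairYs q) := by
        rw [PySem.List.foldl_congr_mem _ _
          (fun acc i =>
            (acc.1 ++ [PySem.List.pyGetD (q.map Prod.fst) (i + 1) 0] ++ [PySem.List.pyGetD (q.map Prod.fst) (i + 1) 0],
             acc.2 ++ [PySem.List.pyGetD (q.map Prod.snd) i 0] ++ [PySem.List.pyGetD (q.map Prod.snd) (i + 1) 0])) _ ?_]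
        · rw [show ((q.length : Int) - 1) = (((q.map Prod.fst).length : Int) - 1) from by simp]
          exact ih hqne
        · intro acc i hi
          rw [PySem.List.mem_pyRange_one] at hi
          obtain ⟨g0, g1⟩ := hi
          rw [List.map_append, List.map_append,
              pv_getD_append_left (q.map Prod.fst) _ (i + 1) 0 (by omega) (by simp; omega),
              pv_getD_append_left (q.map Prod.snd) _ i 0 (by omega) (by simp; omega),
              pv_getD_append_left (q.map Prod.snd) _ (i + 1) 0 (by omega) (by simp; omega)]
      have i0x : PySem.List.pyGetD ((q ++ [p]).map Prod.fst) 0 0 = PySem.List.pyGetD (q.map Prod.fst) 0 0 := by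
        rw [List.map_append]; exact pv_getD_append_left _ _ 0 0 (by omega) (by simp; omega)
      have i0y : PySem.List.pyGetD ((q ++ [p]).map Prod.snd) 0 0 = PySem.List.pyGetD (q.map Prod.snd) 0 0 := by
        rw [List.map_append]; exact pv_getD_append_left _ _ 0 0 (by omega) (by simp; omega)
      rw [e1]
      rw [PySem.List.pyRange_one_succ_right (by omega)]
      rw [List.foldl_append, i0x, i0y, hpre]
      have ex : PySem.List.pyGetD ((q ++ [p]).map Prod.fst) ((q.length : Int) - 1 + 1) 0 = p.1 := by
        rw [List.map_append, show (q.length : Int) - 1 + 1 = (((q.map Prod.fst).length : Nat) : Int) from by simp only [List.length_map]; omega]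
        exact pv_getD_append_last _ _ _
      have ey2 : PySem.List.pyGetD ((q ++ [p]).map Prod.snd) ((q.length : Int) - 1 + 1) 0 = p.2 := by
        rw [List.map_append, show (q.length : Int) - 1 + 1 = (((q.map Prod.snd).length : Nat) : Int) from by simp only [List.length_map]; omega]
        exact pv_getD_append_last _ _ _
      have ey1 : PySem.List.pyGetD ((q ++ [p]).map Prod.snd) ((q.length : Int) - 1) 0 = (q.getLast hqne).2 := by
        rw [List.map_append, pv_getD_append_left _ _ _ _ (by omega) (by simp only [List.length_map]; omega)]
        rw [PySem.List.pyGetD_eq_getElem (q.map Prod.snd) 0 (by omega) (by simp only [List.length_map]; omega)]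
        rw [List.getLast_eq_getElem]
        have hidx : ((q.length : Int) - 1).toNat = q.length - 1 := by omega
        simp only [List.getElem_map, hidx]
      simp only [List.foldl_cons, List.foldl_nil, ex, ey1, ey2]
      rw [pvStairXs_snoc q p hqne, pvStairYs_snoc q p hqne]
      simp [List.append_assoc]

-- ---- B invariant ----

lemma pv_min?_snoc (xs : List Int) (y : Int) :
    (xs ++ [y]).min? = (match xs.min? with | none => some y | some b => some (if y < b then y else b)) := by
  cases xs with
  | nil => simp
  | cons a t =>
    simp only [List.cons_append, List.min?_cons', List.foldl_append, List.foldl_cons, List.foldl_nil]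
    congr 1
    rcases le_or_gt (t.foldl min a) y with h | h
    · rw [min_eq_left h, if_neg (by omega)]
    · rw [min_eq_right (le_of_lt h), if_pos h]

lemma pv_survive_iff (t : List (Int × Int)) (p : Int × Int) :
    (match (pvBelow t p.1).min? with | none => true | some m => decide (p.2 ≤ m)) = pvNoDominator t p := by
  rcases hm : (pvBelow t p.1).min? with _ | m
  · rw [List.min?_eq_none_iff] at hm
    unfold pvBelow at hm
    simp only [List.map_eq_nil_iff, List.filter_eq_nil_iff] at hm
    simp only [pvNoDominator]
    symm
    simp only [List.all_eq_true]
    intro q hq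
    have := hm q hq
    simp only [decide_eq_true_eq] at this
    simp [this]
  · rw [List.min?_eq_some_iff] at hm
    obtain ⟨hmem, hmin⟩ := hm
    simp only []
    apply Bool.eq_iff_iff.mpr
    simp only [decide_eq_true_eq, pvNoDominator, List.all_eq_true]
    constructor
    · intro hle q hq
      simp only [Bool.not_eq_eq_eq_not, Bool.not_true, Bool.and_eq_false_iff]
      by_cases h1 : q.1 < p.1
      · have : q.2 ∈ pvBelow t p.1 := by
          unfold pvBelow
          exact List.mem_map_of_mem (List.mem_filter.mpr ⟨hq, by simpa using h1⟩)
        have := hmin _ this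
        right; simp; omega
      · left; simpa using h1
    · intro hall
      unfold pvBelow at hmem
      simp only [List.mem_map, List.mem_filter, decide_eq_true_eq] at hmem
      obtain ⟨q, ⟨hq, h1⟩, h2⟩ := hmem
      have := hall q hq
      simp only [Bool.not_eq_eq_eq_not, Bool.not_true, Bool.and_eq_false_iff, decide_eq_false_iff_not] at this
      rcases this with h | h
      · exact absurd h1 h
      · omega

lemma pv_B_step (s t r : List (Int × Int)) (p : Int × Int)
    (hs : s = t ++ p :: r) (hp : s.Pairwise pvLexLe) :
    pvBStep (pvSpecState s t) p = pvSpecState s (t ++ [p]) := by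
  subst hs
  have hsplit := List.pairwise_append.mp hp
  have hF1 : ∀ q ∈ t, pvLexLe q p := fun q hq => hsplit.2.2 q hq p (List.mem_cons_self)
  have hDomP : pvNoDominator (t ++ p :: r) p = pvNoDominator t p := by
    simp only [pvNoDominator, List.all_append, List.all_cons]
    have h1 : (!(decide (p.1 < p.1) && decide (p.2 < p.2))) = true := by simp
    have h2 : r.all (fun q => !(decide (q.1 < p.1) && decide (q.2 < p.2))) = true := by
      simp only [List.all_eq_true]
      intro q hq
      have := (List.pairwise_cons.mp hsplit.2.1).1 q hq
      unfold pvLexLe at this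
      simp only [Bool.not_eq_eq_eq_not, Bool.not_true, Bool.and_eq_false_iff, decide_eq_false_iff_not]
      left; omega
    rw [h1, h2]
    simp
  -- the new group minimum equals the below-minimum for p.1
  have hMin : (if (pvSpecState (t ++ p :: r) t).curX ≠ some p.1
        then (pvSpecState (t ++ p :: r) t).best
        else (pvSpecState (t ++ p :: r) t).minY) = (pvBelow (t ++ [p]) p.1).min? := by
    rcases List.eq_nil_or_concat t with rfl | ⟨t₀, a, ht⟩
    · simp [pvSpecState, pvBelow]
    · rw [List.concat_eq_append] at ht
      subst ht
      have hlast : (t₀ ++ [a]).getLast? = some a := by simp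
      have haLe : a.1 ≤ p.1 := by
        have := hF1 a (by simp)
        unfold pvLexLe at this; omega
      have hInner : ∀ q ∈ t₀, pvLexLe q a := by
        intro q hq
        exact (List.pairwise_append.mp hsplit.1).2.2 q hq a (by simp)
      have hbp : pvBelow ((t₀ ++ [a]) ++ [p]) p.1 = if a.1 = p.1 then pvBelow (t₀ ++ [a]) a.1 else (t₀ ++ [a]).map Prod.snd := by
        by_cases hax : a.1 = p.1
        · rw [if_pos hax, ← hax]
          unfold pvBelow
          rw [List.filter_append]
          simp [show ¬ (p.1 < a.1) from by omega]
        · have hstrict : ∀ q ∈ t₀ ++ [a], q.1 < p.1 := by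
            intro q hq
            rcases List.mem_append.mp hq with hq | hq
            · have := hInner q hq; unfold pvLexLe at this; omega
            · simp at hq; subst hq; omega
          rw [if_neg hax]
          unfold pvBelow
          rw [List.filter_append (t₀ ++ [a]) [p]]
          rw [List.filter_eq_self.mpr (fun q hq => by simpa using hstrict q hq)]
          simp [show ¬ (p.1 < p.1) from by omega]
      rw [hbp]
      by_cases hax : a.1 = p.1
      · have hcx : (pvSpecState ((t₀ ++ [a]) ++ p :: r) (t₀ ++ [a])).curX = some p.1 := by
          simp [pvSpecState, hlast, hax]
        rw [hcx, if_neg (by simp), if_pos hax]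
        simp [pvSpecState, hlast]
      · have hcx : (pvSpecState ((t₀ ++ [a]) ++ p :: r) (t₀ ++ [a])).curX = some a.1 := by
          simp [pvSpecState, hlast]
        rw [hcx, if_pos (by simp [hax]), if_neg hax]
        simp [pvSpecState]
  have hs1 : (if (pvSpecState (t ++ p :: r) t).curX ≠ some p.1
        then { pvSpecState (t ++ p :: r) t with curX := some p.1, minY := (pvSpecState (t ++ p :: r) t).best }
        else pvSpecState (t ++ p :: r) t)
      = { pvSpecState (t ++ p :: r) t with curX := some p.1, minY := (pvBelow (t ++ [p]) p.1).min? } := by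
    by_cases hc : (pvSpecState (t ++ p :: r) t).curX ≠ some p.1
    · rw [if_pos hc] at hMin ⊢
      dsimp only
      rw [hMin]
    · rw [if_neg hc] at hMin ⊢
      simp only [ne_eq, not_not] at hc
      dsimp only
      conv_rhs => rw [← hMin, ← hc]
  have hDomP2 : pvNoDominator (t ++ [p]) p = pvNoDominator (t ++ p :: r) p := by
    rw [hDomP]
    simp only [pvNoDominator, List.all_append, List.all_cons, List.all_nil]
    simp [show ¬ (p.1 < p.1) from by omega]
  simp only [pvBStep]
  rw [hs1]
  dsimp only [pvSpecState]
  rw [pv_survive_iff (t ++ [p]) p, hDomP2, hDomP]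
  have hfilp : List.filter (pvNoDominator (t ++ p :: r)) [p] = (if pvNoDominator t p then [p] else []) := by
    cases hd' : pvNoDominator t p <;> simp [List.filter_singleton, hDomP, hd']
  have hfil : (t ++ [p]).filter (pvNoDominator (t ++ p :: r))
      = t.filter (pvNoDominator (t ++ p :: r)) ++ (if pvNoDominator t p then [p] else []) := by
    rw [List.filter_append, hfilp]
  have hbest : (((t ++ [p]).map Prod.snd).min?)
      = (match (t.map Prod.snd).min? with
          | none => some p.2
          | some b => if p.2 < b then some p.2 else some b) := by
    rw [List.map_append]
    simp only [List.map_cons, List.map_nil]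
    rw [pv_min?_snoc]
    rcases (t.map Prod.snd).min? with _ | b
    · rfl
    · dsimp only
      by_cases hb : p.2 < b <;> simp [hb]
  by_cases hd : pvNoDominator t p
  · rw [if_pos hd]
    rw [hfil, if_pos hd]
    by_cases hu : t.filter (pvNoDominator (t ++ p :: r)) = []
    · rw [if_neg (by simp [hu, pvStairXs_ne_nil_iff])]
      dsimp only
      rw [hu]
      simp only [List.nil_append, List.getLast?_concat, Option.map_some, PvBState.mk.injEq]
      refine ⟨by simp [pvStairXs], by simp [pvStairYs], trivial, trivial, hbest.symm, by simp⟩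
    · rw [if_pos (by simp [pvStairXs_ne_nil_iff, hu])]
      dsimp only
      have hprev : (t.filter (pvNoDominator (t ++ p :: r))).getLast?.map Prod.snd
          = some ((t.filter (pvNoDominator (t ++ p :: r))).getLast hu).2 := by
        rw [List.getLast?_eq_some_getLast hu]
        rfl
      rw [hprev]
      simp only [Option.getD_some, List.getLast?_concat, Option.map_some, PvBState.mk.injEq]
      refine ⟨?_, ?_, trivial, trivial, hbest.symm, trivial⟩
      · rw [pvStairXs_snoc _ p hu]
        simp [List.append_assoc]
      · rw [pvStairYs_snoc _ p hu]
        simp [List.append_assoc]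
  · rw [if_neg hd]
    rw [hfil, if_neg hd, List.append_nil]
    simp only [List.getLast?_concat, Option.map_some, PvBState.mk.injEq]
    exact ⟨trivial, trivial, trivial, trivial, hbest.symm, trivial⟩

lemma pv_B_run (s : List (Int × Int)) (hp : s.Pairwise pvLexLe) :
    ∀ (r t : List (Int × Int)), s = t ++ r →
      r.foldl pvBStep (pvSpecState s t) = pvSpecState s (t ++ r) := by
  intro r
  induction r with
  | nil => intro t ht; simp
  | cons p r' ih =>
    intro t ht
    simp only [List.foldl_cons]
    rw [pv_B_step s t r' p ht hp]
    have := ih (t ++ [p]) (by rw [ht]; simp)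
    rw [this]
    simp

lemma pv_filter_domBy_ne_nil (s : List (Int × Int)) (hp : s.Pairwise pvLexLe) (hs : s ≠ []) :
    s.filter (pvNoDominator s) ≠ [] := by
  cases s with
  | nil => exact absurd rfl hs
  | cons h t =>
    have hdom : pvNoDominator (h :: t) h = true := by
      simp only [pvNoDominator, List.all_cons, Bool.and_eq_true, List.all_eq_true]
      constructor
      · simp
      · intro q hq
        have := (List.pairwise_cons.mp hp).1 q hq
        unfold pvLexLe at this
        simp only [Bool.not_eq_eq_eq_not, Bool.not_true, Bool.and_eq_false_iff, decide_eq_false_iff_not]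
        left; omega
    simp [List.filter_cons, hdom]

-- ===== VERDICT (by name: the statement is the Claim_ definition above) =====
theorem plot_pareto_curve_plotly_spec : Claim_equal_plot_pareto_curve_plotly := by
  intro o1 o2 _ hpre
  obtain ⟨hlen, hne⟩ := hpre
  have hperm : (o1.zip o2).Perm (PySem.List.sorted2 (o1.zip o2) Prod.fst Prod.snd) :=
    (PySem.List.sorted2_perm (o1.zip o2) Prod.fst Prod.snd false).symm
  have hpw := pv_sorted2_pairwise (o1.zip o2)
  have hlne : (o1.zip o2) ≠ [] := by
    intro h
    have h0 : (o1.zip o2).length = 0 := by rw [h]; rfl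
    rw [List.length_zip, ← hlen, min_self] at h0
    exact hne (List.length_eq_zero_iff.mp h0)
  have hsne : PySem.List.sorted2 (o1.zip o2) Prod.fst Prod.snd ≠ [] := by
    intro h
    have hl0 := hperm.length_eq
    rw [h] at hl0
    exact hlne (List.length_eq_zero_iff.mp hl0)
  have hq := pv_filter_domBy_ne_nil _ hpw hsne
  unfold Spec_plot_pareto_curve_plotly plot_pareto_curve_plotly plot_pareto_curve_plotly_alt
  rw [pv_compute_pareto_eq o1 o2 hlen]
  dsimp only
  have hzip : (((o1.zip o2).filter (pvNoDominator (o1.zip o2))).map Prod.fst).zip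
      (((o1.zip o2).filter (pvNoDominator (o1.zip o2))).map Prod.snd)
      = (o1.zip o2).filter (pvNoDominator (o1.zip o2)) := Eq.symm (List.zip_of_prod rfl rfl)
  rw [hzip, pv_filter_sorted_comm, List.filter_congr (fun x _ => pvNoDominator_perm x hperm)]
  rw [pv_A_stair _ hq]
  rw [show (⟨[], [], none, none, none, none⟩ : PvBState)
      = pvSpecState (PySem.List.sorted2 (o1.zip o2) Prod.fst Prod.snd) [] from rfl]
  rw [pv_B_run _ hpw (PySem.List.sorted2 (o1.zip o2) Prod.fst Prod.snd) [] (by simp)]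
  simp [pvSpecState]
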